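-- pv_equiv track=rewrite | github.com/kurta17/problem-solving | temirlan/weeklymathcontest/J - Product and GCD .py | max_gcd
-- ===== SOURCE A (Python) =====
-- def prime_factors(n):
--     i = 2
--     factors = {}
--     while i * i <= n:
--         while (n % i) == 0:
--             if i in factors:
--                 factors[i] += 1
--             else:
--                 factors[i] = 1
--             n //= i
--         i += 1
--     if n > 1:
--         factors[n] = 1 if n not in factors else factors[n] + 1
--     return factors
--
-- def max_gcd(N, P):
--     if P == 1:
--         return 1
--
--     factors = prime_factors(P)
--     gcd_result = 1
--
--     for prime, exponent in factors.items():
--         gcd_result *= prime ** (exponent // N)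
--
--     return gcd_result
-- ===== SOURCE B (Python) =====
-- def _bounded_pow(b, n, limit):
--     # b**n if b**n <= limit else None, stopping as soon as the limit is passed
--     r = 1
--     for _ in range(n):
--         r *= b
--         if r > limit:
--             return None
--     return r
--
-- def max_gcd(N, P):
--     # Different algorithm: no factorization. The answer is the largest g with
--     # g**N dividing P, found by a greedy divisor search: multiply g by the
--     # smallest d (tried in increasing order) while (g*d)**N still divides P.
--     # For N == 1 that largest g is P itself.
--     if P <= 1:
--         return 1
--     if N == 1:
--         return P
--     g = 1
--     d = 2
--     while True:
--         t = _bounded_pow(g * d, N, P)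
--         if t is None:
--             return g
--         if P % t == 0:
--             g *= d
--         else:
--             d += 1
-- ===== Notes on version B (the rewrite author's own statement) =====
-- stated objective: alternative
-- what changed: B never factorizes P: it computes the answer as the largest g with g**N dividing P by a greedy divisor search (multiply g by the smallest workable d in increasing order), with the N==1 case collapsing to P itself; A's prime-factorization dict and exponent arithmetic are gone.
-- outside the precondition, e.g. on max_gcd(0, 2): A raises ZeroDivisionError, B does not finish within the time limit; on max_gcd(-1, 4): A returns 0.25, B does not finish within the time limit
import Mathlib
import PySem

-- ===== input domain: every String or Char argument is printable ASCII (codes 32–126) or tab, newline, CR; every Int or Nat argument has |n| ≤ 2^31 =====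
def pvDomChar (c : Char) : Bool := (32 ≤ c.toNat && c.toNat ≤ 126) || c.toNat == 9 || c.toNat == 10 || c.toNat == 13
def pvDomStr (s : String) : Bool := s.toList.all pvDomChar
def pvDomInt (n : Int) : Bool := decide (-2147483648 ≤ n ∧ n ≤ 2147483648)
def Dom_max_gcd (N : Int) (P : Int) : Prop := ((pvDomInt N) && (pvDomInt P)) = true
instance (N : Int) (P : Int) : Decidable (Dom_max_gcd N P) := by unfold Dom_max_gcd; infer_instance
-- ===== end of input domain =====

-- B abandons factorization altogether: it returns the largest g with g^N ∣ P,
-- found by a greedy divisor search (N = 1 collapses to P). Return values only.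
-- The Nat fuel arguments of the loop functions are totality devices: each loop
-- strictly decreases its measure and the fuel at the call site dominates it.

-- ===== PORT A =====
-- inner 'while (n % i) == 0' of prime_factors (dict update then n //= i); the
-- conjuncts '2 ≤ i ∧ 1 ≤ n' only stop the loop where Python would diverge.
def pfInner : Nat → Int → Int → PySem.Dict Int Int → Int × PySem.Dict Int Int
  | 0, _, n, f => (n, f)
  | k + 1, i, n, f =>
    if PySem.Int.mod n i = 0 ∧ 2 ≤ i ∧ 1 ≤ n then
      pfInner k i (PySem.Int.floordiv n i)
        (if f.contains i then f.insert i (f.getD i 0 + 1) else f.insert i 1)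
    else (n, f)

-- outer 'while i * i <= n' of prime_factors
def pfOuter : Nat → Int → Int → PySem.Dict Int Int → Int × PySem.Dict Int Int
  | 0, _, n, f => (n, f)
  | k + 1, i, n, f =>
    if i * i ≤ n then
      pfOuter k (i + 1) (pfInner n.toNat i n f).1 (pfInner n.toNat i n f).2
    else (n, f)

-- 'if n > 1: factors[n] = 1 if n not in factors else factors[n] + 1'
def pfLeftover (r : Int × PySem.Dict Int Int) : PySem.Dict Int Int :=
  if 1 < r.1 then
    if r.2.contains r.1 then r.2.insert r.1 (r.2.getD r.1 0 + 1) else r.2.insert r.1 1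
  else r.2

def prime_factors (n : Int) : PySem.Dict Int Int :=
  pfLeftover (pfOuter (2 * n + 2).toNat 2 n PySem.Dict.empty)

-- 'for prime, exponent in factors.items(): gcd_result *= prime ** (exponent // N)'
def aFold (N : Int) (l : List (Int × Int)) : Int :=
  l.foldl (fun g pe => g * pe.1 ^ ((PySem.Int.floordiv pe.2 N).toNat)) 1

def max_gcd (N : Int) (P : Int) : Int :=
  if P = 1 then 1 else aFold N (prime_factors P).items

-- ===== PORT B =====
-- '_bounded_pow(b, n, limit)': r = 1; n times r *= b with an early None once
-- r > limit ('range(n)' is 'n.toNat' steps, exact for the N ≥ 1 reached under Pre_)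
def boundedPow : Nat → Int → Int → Int → Option Int
  | 0, _, _, r => some r
  | n + 1, b, limit, r =>
    if limit < r * b then none else boundedPow n b limit (r * b)

-- 'while True: t = _bounded_pow(g*d, N, P); if t is None: return g; …'
def bLoop : Nat → Int → Int → Int → Int → Int
  | 0, _, _, _, g => g
  | k + 1, N, P, d, g =>
    match boundedPow N.toNat (g * d) P 1 with
    | none => g
    | some t =>
      if PySem.Int.mod P t = 0 then bLoop k N P d (g * d)
      else bLoop k N P (d + 1) g

def max_gcd_alt (N : Int) (P : Int) : Int :=
  if P ≤ 1 then 1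
  else if N = 1 then P
  else bLoop (P + 1).toNat N P 2 1

-- ===== PRECONDITION & SPEC =====
-- Pre_ excludes N ≤ 0 with 2 ≤ P: there A returns no int — ZeroDivisionError for
-- N = 0, a Python float (prime ** negative) for N < 0.
def Pre_max_gcd (N : Int) (P : Int) : Prop := P ≤ 1 ∨ 1 ≤ N
instance (N : Int) (P : Int) : Decidable (Pre_max_gcd N P) := by unfold Pre_max_gcd; infer_instance
def pvWitness_max_gcd : Int × Int := (2, 360)

def Spec_max_gcd (N : Int) (P : Int) (out : Int) : Prop := out = max_gcd_alt N P
instance (N : Int) (P : Int) (out : Int) : Decidable (Spec_max_gcd N P out) := by unfold Spec_max_gcd; infer_instance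

-- ===== CLAIM (what is proved, stated in full; the proofs are below) =====
def Claim_equal_max_gcd : Prop := ∀ (N : Int) (P : Int), Dom_max_gcd N P → Pre_max_gcd N P → Spec_max_gcd N P (max_gcd N P)

-- ===== LEMMAS AND PROOFS =====

-- proof-side helper: the value and count of the repeated division 'while n % i == 0'
def divOut : Nat → Int → Int → Int → Int × Int
  | 0, _, n, e => (n, e)
  | k + 1, i, n, e =>
    if PySem.Int.mod n i = 0 ∧ 2 ≤ i ∧ 1 ≤ n then
      divOut k i (PySem.Int.floordiv n i) (e + 1)
    else (n, e)

-- 'p ≥ 2 with no proper divisor' (primality over Int)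
def IntPrime (p : Int) : Prop := 2 ≤ p ∧ ∀ d : Int, 2 ≤ d → d < p → ¬ d ∣ p

-- ∏ p^e over an Int association list
def prodPowInt (l : List (Int × Int)) : Int := (l.map fun pe => pe.1 ^ pe.2.toNat).prod

-- Nat-level: ∏ p^e and the factorization Finsupp of such a list
def pvProdE (L : List (Nat × Nat)) : Nat := (L.map fun pe => pe.1 ^ pe.2).prod
def pvF (L : List (Nat × Nat)) (q : Nat) : Nat :=
  (L.map fun pe => if pe.1 = q then pe.2 else 0).sum
def toNatL (l : List (Int × Int)) : List (Nat × Nat) := l.map fun pe => (pe.1.toNat, pe.2.toNat)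

theorem pvDivStep (n i : Int) (h : PySem.Int.mod n i = 0 ∧ 2 ≤ i ∧ 1 ≤ n) :
    1 ≤ PySem.Int.floordiv n i ∧ PySem.Int.floordiv n i < n := by
  obtain ⟨hm, hi, hn⟩ := h
  obtain ⟨k, rfl⟩ := (PySem.Int.mod_eq_zero_iff_dvd _ i).1 hm
  rw [PySem.Int.floordiv_eq_ediv_of_pos (by omega), Int.mul_ediv_cancel_left _ (by omega)]
  exact ⟨by nlinarith, by nlinarith⟩

theorem pfInner_stop (k : Nat) (i n : Int) (f : PySem.Dict Int Int)
    (h : ¬ (PySem.Int.mod n i = 0 ∧ 2 ≤ i ∧ 1 ≤ n)) : pfInner k i n f = (n, f) := by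
  cases k <;> simp [pfInner, h]

theorem divOut_stop (k : Nat) (i n e : Int)
    (h : ¬ (PySem.Int.mod n i = 0 ∧ 2 ≤ i ∧ 1 ≤ n)) : divOut k i n e = (n, e) := by
  cases k <;> simp [divOut, h]

theorem pfOuter_stop (k : Nat) (i n : Int) (f : PySem.Dict Int Int)
    (h : ¬ i * i ≤ n) : pfOuter k i n f = (n, f) := by
  cases k <;> simp [pfOuter, h]

theorem divOut_acc (i : Int) : ∀ (k : Nat) (n e : Int),
    divOut k i n e = ((divOut k i n 0).1, e + (divOut k i n 0).2) := by
  intro k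
  induction k with
  | zero => intro n e; simp [divOut]
  | succ k ih =>
    intro n e
    by_cases h : PySem.Int.mod n i = 0 ∧ 2 ≤ i ∧ 1 ≤ n
    · simp only [divOut, if_pos h]
      rw [ih _ (e + 1), ih _ (0 + 1)]
      simp; ring
    · simp only [divOut, if_neg h]; simp

theorem divOut_fst_le (i : Int) : ∀ (k : Nat) (n e : Int), (divOut k i n e).1 ≤ n := by
  intro k
  induction k with
  | zero => intro n e; simp [divOut]
  | succ k ih =>
    intro n e
    by_cases h : PySem.Int.mod n i = 0 ∧ 2 ≤ i ∧ 1 ≤ n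
    · simp only [divOut, if_pos h]
      have := pvDivStep n i h
      exact le_trans (ih _ _) (by omega)
    · simp [divOut, if_neg h]

theorem divOut_fst_pos (i : Int) : ∀ (k : Nat) (n e : Int), 1 ≤ n → 1 ≤ (divOut k i n e).1 := by
  intro k
  induction k with
  | zero => intro n e hn; simpa [divOut] using hn
  | succ k ih =>
    intro n e hn
    by_cases h : PySem.Int.mod n i = 0 ∧ 2 ≤ i ∧ 1 ≤ n
    · simp only [divOut, if_pos h]
      exact ih _ _ (pvDivStep n i h).1
    · simpa [divOut, if_neg h] using hn

theorem divOut_fst_dvd (i : Int) : ∀ (k : Nat) (n e : Int), (divOut k i n e).1 ∣ n := by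
  intro k
  induction k with
  | zero => intro n e; simp [divOut]
  | succ k ih =>
    intro n e
    by_cases h : PySem.Int.mod n i = 0 ∧ 2 ≤ i ∧ 1 ≤ n
    · simp only [divOut, if_pos h]
      refine dvd_trans (ih _ _) ?_
      obtain ⟨c, rfl⟩ := (PySem.Int.mod_eq_zero_iff_dvd _ i).1 h.1
      rw [PySem.Int.floordiv_eq_ediv_of_pos (by omega), Int.mul_ediv_cancel_left _ (by omega)]
      exact Dvd.intro_left _ rfl
    · simp [divOut, if_neg h]

theorem divOut_not_dvd (i : Int) : ∀ (k : Nat) (n e : Int), n.toNat ≤ k → 2 ≤ i → 1 ≤ n →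
    ¬ i ∣ (divOut k i n e).1 := by
  intro k
  induction k with
  | zero => intro n e hk hi hn; omega
  | succ k ih =>
    intro n e hk hi hn
    by_cases h : PySem.Int.mod n i = 0 ∧ 2 ≤ i ∧ 1 ≤ n
    · simp only [divOut, if_pos h]
      have := pvDivStep n i h
      exact ih _ _ (by omega) hi this.1
    · simp only [divOut, if_neg h]
      intro hd
      exact h ⟨(PySem.Int.mod_eq_zero_iff_dvd _ i).2 hd, hi, hn⟩

theorem divOut_snd_nonneg (i : Int) : ∀ (k : Nat) (n e : Int), 0 ≤ e → 0 ≤ (divOut k i n e).2 := by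
  intro k
  induction k with
  | zero => intro n e he; simpa [divOut] using he
  | succ k ih =>
    intro n e he
    by_cases h : PySem.Int.mod n i = 0 ∧ 2 ≤ i ∧ 1 ≤ n
    · simp only [divOut, if_pos h]
      exact ih _ _ (by omega)
    · simpa [divOut, if_neg h] using he

-- n is recovered from the division loop: n = rest * i^count
theorem divOut_prod (i : Int) : ∀ (k : Nat) (n : Int), 2 ≤ i →
    n = (divOut k i n 0).1 * i ^ ((divOut k i n 0).2).toNat := by
  intro k
  induction k with
  | zero => intro n hi; simp [divOut]
  | succ k ih =>
    intro n hi
    by_cases h : PySem.Int.mod n i = 0 ∧ 2 ≤ i ∧ 1 ≤ n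
    · simp only [divOut, if_pos h]
      rw [divOut_acc i k _ (0 + 1)]
      dsimp only
      have hsn : 0 ≤ (divOut k i (PySem.Int.floordiv n i) 0).2 :=
        divOut_snd_nonneg i k _ 0 le_rfl
      have hpow : ((0:Int) + 1 + (divOut k i (PySem.Int.floordiv n i) 0).2).toNat
          = ((divOut k i (PySem.Int.floordiv n i) 0).2).toNat + 1 := by omega
      rw [hpow, pow_succ]
      obtain ⟨c, hc⟩ := (PySem.Int.mod_eq_zero_iff_dvd _ i).1 h.1
      have hfd : PySem.Int.floordiv n i = c := by
        rw [hc, PySem.Int.floordiv_eq_ediv_of_pos (by omega), Int.mul_ediv_cancel_left _ (by omega)]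
      have key := ih (PySem.Int.floordiv n i) hi
      calc n = i * c := hc
        _ = PySem.Int.floordiv n i * i := by rw [hfd]; ring
        _ = _ := by conv_lhs => rw [key]
        _ = _ := by ring
    · rw [divOut_stop _ _ _ _ h]; simp

theorem divOut_snd_pos (i : Int) (k : Nat) (n : Int)
    (h : PySem.Int.mod n i = 0 ∧ 2 ≤ i ∧ 1 ≤ n) (hk : 1 ≤ k) :
    1 ≤ (divOut k i n 0).2 := by
  obtain ⟨k', rfl⟩ : ∃ k', k = k' + 1 := ⟨k - 1, by omega⟩
  simp only [divOut, if_pos h]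
  rw [divOut_acc i k' _ (0 + 1)]
  have := divOut_snd_nonneg i k' (PySem.Int.floordiv n i) 0 le_rfl
  omega

-- pfInner in terms of divOut (same fuel on both sides)
theorem pfInner_eq (i : Int) (hi : 2 ≤ i) : ∀ (k : Nat) (n : Int) (f : PySem.Dict Int Int),
    n.toNat ≤ k → 1 ≤ n →
    pfInner k i n f = ((divOut k i n 0).1,
      if PySem.Int.mod n i = 0 then
        (if f.contains i then f.insert i (f.getD i 0 + (divOut k i n 0).2)
         else f.insert i (divOut k i n 0).2)
      else f) := by
  intro k
  induction k with
  | zero => intro n f hk hn; omega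
  | succ k ih =>
    intro n f hk hn
    by_cases hm : PySem.Int.mod n i = 0
    · have h : PySem.Int.mod n i = 0 ∧ 2 ≤ i ∧ 1 ≤ n := ⟨hm, hi, hn⟩
      have hd := pvDivStep n i h
      have hdo : divOut (k + 1) i n 0 = ((divOut k i (PySem.Int.floordiv n i) 0).1,
          1 + (divOut k i (PySem.Int.floordiv n i) 0).2) := by
        simp only [divOut, if_pos h]
        rw [divOut_acc i k _ (0 + 1)]
        simp
      simp only [pfInner, if_pos h]
      rw [ih _ _ (by omega) (by omega), hdo, if_pos hm]
      by_cases hm2 : PySem.Int.mod (PySem.Int.floordiv n i) i = 0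
      · rw [if_pos hm2]
        by_cases hc : f.contains i
        · rw [if_pos hc]
          simp only [PySem.Dict.contains_insert_self, if_pos, PySem.Dict.getD_insert_self,
            PySem.Dict.insert_insert_self]
          rw [if_pos hc]
          try simp only [Prod.mk.injEq, true_and]
          all_goals (congr 1 <;> try ring)
        · rw [if_neg hc]
          simp only [PySem.Dict.contains_insert_self, if_pos, PySem.Dict.getD_insert_self,
            PySem.Dict.insert_insert_self]
          rw [if_neg hc]
          try simp only [Prod.mk.injEq, true_and]
          all_goals (congr 1 <;> try ring)
      · rw [if_neg hm2]
        have hz : divOut k i (PySem.Int.floordiv n i) 0 = (PySem.Int.floordiv n i, 0) :=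
          divOut_stop k i _ 0 (fun hh => hm2 hh.1)
        rw [hz]
        by_cases hc : f.contains i
        · rw [if_pos hc]
          simp only [PySem.Dict.contains_insert_self, if_pos, PySem.Dict.getD_insert_self,
            PySem.Dict.insert_insert_self]
          rw [if_pos hc]
          try simp only [Prod.mk.injEq, true_and]
          all_goals (congr 1 <;> try ring)
        · rw [if_neg hc]
          simp only [PySem.Dict.contains_insert_self, if_pos, PySem.Dict.getD_insert_self,
            PySem.Dict.insert_insert_self]
          rw [if_neg hc]
          try simp only [Prod.mk.injEq, true_and]
          all_goals (congr 1 <;> try ring)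
    · have hz : divOut (k + 1) i n 0 = (n, 0) := divOut_stop _ i n 0 (fun hh => hm hh.1)
      rw [pfInner_stop _ i n f (fun hh => hm hh.1), hz, if_neg hm]

-- a key outside [2, bound) of a dict whose keys all lie in it is absent
theorem contains_false_of_keys_lt (f : PySem.Dict Int Int) (x bound : Int)
    (hk : ∀ p, p ∈ f.keys → 2 ≤ p ∧ p < bound) (hx : bound ≤ x) : f.contains x = false := by
  by_contra hb
  have hc : f.contains x = true := by revert hb; cases f.contains x <;> simp
  have := (hk x ((PySem.Dict.contains_iff_mem_keys (d := f) (k := x)).1 hc))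
  omega

-- ========== the trial-division characterization of A's dict ==========
-- exit shape: what pfLeftover appends once the outer loop has stopped
theorem pfExit (i n : Int) (f : PySem.Dict Int Int) (hn : 1 ≤ n) (hi : 2 ≤ i)
    (hc : ¬ i * i ≤ n) (hnd : ∀ d : Int, 2 ≤ d → d < i → ¬ d ∣ n)
    (hkeys : ∀ p, p ∈ f.keys → 2 ≤ p ∧ p < i) :
    ∃ l, (pfLeftover (n, f)).items = f.items ++ l ∧
      prodPowInt l = n ∧
      (∀ pe ∈ l, IntPrime pe.1 ∧ 1 ≤ pe.2 ∧ i ≤ pe.1) ∧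
      (l.map Prod.fst).Pairwise (· < ·) := by
  by_cases h1 : 1 < n
  · have hni : i ≤ n := by
      by_contra h
      exact hnd n (by omega) (by omega) dvd_rfl
    have hcont : f.contains n = false := contains_false_of_keys_lt f n i hkeys hni
    refine ⟨[(n, 1)], ?_, ?_, ?_, ?_⟩
    · simp only [pfLeftover]
      rw [if_pos (show (1:Int) < (n, f).1 from h1)]
      rw [hcont]
      simp only [Bool.false_eq_true, if_false]
      exact PySem.Dict.items_insert_of_not_contains _ _ hcont
    · simp [prodPowInt]
    · intro pe hpe
      simp only [List.mem_singleton] at hpe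
      subst hpe
      refine ⟨⟨by omega, ?_⟩, by norm_num, hni⟩
      intro d hd2 hdn hddvd
      have hdi : i ≤ d := by
        by_contra h
        exact hnd d hd2 (by omega) hddvd
      obtain ⟨c, hcc⟩ := hddvd
      have hcpos : 1 ≤ c := by nlinarith
      have hc2 : 2 ≤ c := by
        rcases (by omega : c = 1 ∨ 2 ≤ c) with h | h
        · exfalso
          have : n = d := by rw [show n = d * c from hcc, h, mul_one]
          omega
        · exact h
      have hci : i ≤ c := by
        by_contra h
        exact hnd c hc2 (by omega) ⟨d, by rw [show n = d * c from hcc]; ring⟩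
      nlinarith
    · simp
  · have hn1 : n = 1 := by omega
    refine ⟨[], ?_, by simp [prodPowInt, hn1], by simp, by simp⟩
    simp [pfLeftover, hn1]

theorem pfRun : ∀ (k : Nat) (i n : Int) (f : PySem.Dict Int Int),
    (n + 2 - i).toNat ≤ k → 1 ≤ n → 2 ≤ i →
    (∀ d : Int, 2 ≤ d → d < i → ¬ d ∣ n) →
    (∀ p, p ∈ f.keys → 2 ≤ p ∧ p < i) →
    ∃ l, (pfLeftover (pfOuter k i n f)).items = f.items ++ l ∧
      prodPowInt l = n ∧
      (∀ pe ∈ l, IntPrime pe.1 ∧ 1 ≤ pe.2 ∧ i ≤ pe.1) ∧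
      (l.map Prod.fst).Pairwise (· < ·) := by
  intro k
  induction k using Nat.strong_induction_on with
  | _ k ih =>
    intro i n f hk hn hi hnd hkeys
    by_cases hc : i * i ≤ n
    · have hin : i ≤ n := le_trans (by nlinarith) hc
      obtain ⟨k', rfl⟩ : ∃ k', k = k' + 1 := ⟨k - 1, by omega⟩
      have hpf := pfInner_eq i hi n.toNat n f le_rfl hn
      have hstep : pfOuter (k' + 1) i n f
          = pfOuter k' (i + 1) (pfInner n.toNat i n f).1 (pfInner n.toNat i n f).2 := by
        simp only [pfOuter, if_pos hc]
      have hfst : (pfInner n.toNat i n f).1 = (divOut n.toNat i n 0).1 := by rw [hpf]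
      have hn1 : 1 ≤ (divOut n.toNat i n 0).1 := divOut_fst_pos i n.toNat n 0 hn
      have hdvd : (divOut n.toNat i n 0).1 ∣ n := divOut_fst_dvd i n.toNat n 0
      have hle : (divOut n.toNat i n 0).1 ≤ n := divOut_fst_le i n.toNat n 0
      have hnotdvd : ¬ i ∣ (divOut n.toNat i n 0).1 :=
        divOut_not_dvd i n.toNat n 0 le_rfl hi hn
      have hnd' : ∀ d : Int, 2 ≤ d → d < i + 1 → ¬ d ∣ (divOut n.toNat i n 0).1 := by
        intro d hd2 hdi hddvd
        rcases (by omega : d < i ∨ d = i) with h | rfl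
        · exact hnd d hd2 h (dvd_trans hddvd hdvd)
        · exact hnotdvd hddvd
      by_cases hm : PySem.Int.mod n i = 0
      · have hcont : f.contains i = false := contains_false_of_keys_lt f i i hkeys le_rfl
        have hsnd : (pfInner n.toNat i n f).2 = f.insert i (divOut n.toNat i n 0).2 := by
          rw [hpf]
          simp [hm, hcont]
        have hkeys' : ∀ p, p ∈ (f.insert i (divOut n.toNat i n 0).2).keys →
            2 ≤ p ∧ p < i + 1 := by
          intro p hp
          rcases (PySem.Dict.mem_keys_insert f i p _).1 hp with rfl | hp'
          · omega
          · have := hkeys p hp'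
            omega
        obtain ⟨l', hitems, hprod', hprops', hpair'⟩ :=
          ih k' (by omega) (i + 1) (divOut n.toNat i n 0).1 (f.insert i (divOut n.toNat i n 0).2)
            (by omega) hn1 (by omega) hnd' hkeys'
        have hsnd1 : 1 ≤ (divOut n.toNat i n 0).2 :=
          divOut_snd_pos i n.toNat n ⟨hm, hi, hn⟩ (by omega)
        have hprodn : n = (divOut n.toNat i n 0).1 * i ^ ((divOut n.toNat i n 0).2).toNat :=
          divOut_prod i n.toNat n hi
        refine ⟨(i, (divOut n.toNat i n 0).2) :: l', ?_, ?_, ?_, ?_⟩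
        · rw [hstep, hfst, hsnd, hitems,
            PySem.Dict.items_insert_of_not_contains _ _ hcont, List.append_assoc]
          rfl
        · simp only [prodPowInt, List.map_cons, List.prod_cons]
          simp only [prodPowInt] at hprod'
          rw [hprod']
          linarith [hprodn]
        · intro pe hpe
          rcases List.mem_cons.1 hpe with rfl | hpe'
          · refine ⟨⟨hi, ?_⟩, hsnd1, le_rfl⟩
            intro d hd2 hdi hddvd
            exact hnd d hd2 hdi (dvd_trans hddvd ((PySem.Int.mod_eq_zero_iff_dvd _ _).1 hm))
          · obtain ⟨h1, h2, h3⟩ := hprops' pe hpe'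
            exact ⟨h1, h2, by omega⟩
        · rw [List.map_cons, List.pairwise_cons]
          refine ⟨?_, hpair'⟩
          intro b hb
          obtain ⟨a, ha, rfl⟩ := List.mem_map.1 hb
          have := (hprops' a ha).2.2
          omega
      · have hE : divOut n.toNat i n 0 = (n, 0) :=
          divOut_stop _ i n 0 (fun hh => hm hh.1)
        have hsnd : (pfInner n.toNat i n f).2 = f := by
          rw [hpf]
          simp [hm]
        have hkeys' : ∀ p, p ∈ f.keys → 2 ≤ p ∧ p < i + 1 := by
          intro p hp
          have := hkeys p hp
          omega
        obtain ⟨l', hitems, hprod', hprops', hpair'⟩ :=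
          ih k' (by omega) (i + 1) (divOut n.toNat i n 0).1 f
            (by rw [hE]; omega) hn1 (by omega) hnd' hkeys'
        refine ⟨l', ?_, ?_, ?_, hpair'⟩
        · rw [hstep, hfst, hsnd, hitems]
        · rw [hprod', hE]
        · intro pe hpe
          obtain ⟨h1, h2, h3⟩ := hprops' pe hpe
          exact ⟨h1, h2, by omega⟩
    · rw [pfOuter_stop k i n f hc]
      exact pfExit i n f hn hi hc hnd hkeys

-- ========== Nat-level factorization core ==========
theorem pvProdE_pos (L : List (Nat × Nat)) (h : ∀ pe ∈ L, 0 < pe.1) : 0 < pvProdE L := by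
  induction L with
  | nil => simp [pvProdE]
  | cons a t ih =>
    simp only [pvProdE, List.map_cons, List.prod_cons]
    exact Nat.mul_pos (pow_pos (h a (by simp)) _) (ih fun pe hpe => h pe (by simp [hpe]))

theorem pvFact (L : List (Nat × Nat)) (h : ∀ pe ∈ L, pe.1.Prime) (q : Nat) :
    (pvProdE L).factorization q = pvF L q := by
  induction L with
  | nil => simp [pvProdE, pvF]
  | cons a t ih =>
    have hp := h a (by simp)
    have ht : ∀ pe ∈ t, pe.1.Prime := fun pe hpe => h pe (by simp [hpe])
    have h1 : (a.1 ^ a.2 : Nat) ≠ 0 := pow_ne_zero _ hp.pos.ne'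
    have h2 : pvProdE t ≠ 0 := (pvProdE_pos t fun pe hpe => (ht pe hpe).pos).ne'
    have hsplit : pvProdE (a :: t) = a.1 ^ a.2 * pvProdE t := by simp [pvProdE]
    rw [hsplit, Nat.factorization_mul h1 h2, Finsupp.add_apply, hp.factorization_pow,
      Finsupp.single_apply, ih ht]
    simp [pvF]

theorem pvF_notmem (L : List (Nat × Nat)) (q : Nat) (h : q ∉ L.map Prod.fst) : pvF L q = 0 := by
  induction L with
  | nil => simp [pvF]
  | cons a t ih =>
    simp only [List.map_cons, List.mem_cons, not_or] at h
    simp only [pvF, List.map_cons, List.sum_cons]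
    rw [if_neg (fun he => h.1 he.symm)]
    have := ih h.2
    simp only [pvF] at this
    simp [this]

theorem pvF_div (L : List (Nat × Nat)) (N q : Nat) (hnd : (L.map Prod.fst).Nodup) :
    pvF (L.map fun pe => (pe.1, pe.2 / N)) q = pvF L q / N := by
  induction L with
  | nil => simp [pvF]
  | cons a t ih =>
    simp only [List.map_cons, List.nodup_cons] at hnd
    simp only [pvF, List.map_cons, List.sum_cons]
    by_cases hq : a.1 = q
    · subst hq
      have h1 : pvF t a.1 = 0 := pvF_notmem t a.1 hnd.1
      have h2 : pvF (t.map fun pe => (pe.1, pe.2 / N)) a.1 = 0 := by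
        apply pvF_notmem
        simpa using hnd.1
      simp only [pvF] at h1 h2
      rw [if_pos rfl, if_pos rfl, h1, h2]
      simp
    · rw [if_neg hq, if_neg hq]
      have := ih hnd.2
      simpa [pvF] using this

-- core: g^N divides ∏p^e  iff  g divides ∏p^(e/N)
theorem pvCore (L : List (Nat × Nat)) (N g : Nat)
    (hp : ∀ pe ∈ L, pe.1.Prime) (hnd : (L.map Prod.fst).Nodup) (hN : 0 < N) (hg : 0 < g) :
    g ^ N ∣ pvProdE L ↔ g ∣ pvProdE (L.map fun pe => (pe.1, pe.2 / N)) := by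
  have hP : pvProdE L ≠ 0 := (pvProdE_pos L fun pe hpe => (hp pe hpe).pos).ne'
  have hpM : ∀ pe ∈ L.map fun pe => (pe.1, pe.2 / N), pe.1.Prime := by
    intro pe hpe
    obtain ⟨a, ha, rfl⟩ := List.mem_map.1 hpe
    exact hp a ha
  have hM : pvProdE (L.map fun pe => (pe.1, pe.2 / N)) ≠ 0 :=
    (pvProdE_pos _ fun pe hpe => (hpM pe hpe).pos).ne'
  rw [← Nat.factorization_le_iff_dvd (pow_ne_zero _ hg.ne') hP,
    ← Nat.factorization_le_iff_dvd hg.ne' hM, Nat.factorization_pow,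
    Finsupp.le_def, Finsupp.le_def]
  constructor
  · intro h q
    have hh := h q
    simp only [Finsupp.smul_apply, smul_eq_mul] at hh
    rw [pvFact L hp q] at hh
    rw [pvFact _ hpM q, pvF_div L N q hnd]
    exact (Nat.le_div_iff_mul_le hN).2 (Nat.mul_comm N _ ▸ hh)
  · intro h q
    have hh := h q
    rw [pvFact _ hpM q, pvF_div L N q hnd] at hh
    have hmul := (Nat.le_div_iff_mul_le hN).1 hh
    simp only [Finsupp.smul_apply, smul_eq_mul]
    rw [pvFact L hp q]
    exact Nat.mul_comm _ N ▸ hmul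

-- ========== Int ↔ Nat bridges ==========
theorem intPrime_toNat (p : Int) (h : IntPrime p) : p.toNat.Prime := by
  obtain ⟨h2, hnd⟩ := h
  rw [Nat.prime_def_lt]
  constructor
  · omega
  · intro m hm hdvd
    by_contra hne
    have hm0 : m ≠ 0 := by
      rintro rfl
      have := Nat.eq_zero_of_zero_dvd hdvd
      omega
    have hm2 : 2 ≤ m := by omega
    have : (m : Int) ∣ p := by
      have : (m : Int) ∣ (p.toNat : Int) := Int.natCast_dvd_natCast.2 hdvd
      rwa [Int.toNat_of_nonneg (by omega)] at this
    exact hnd m (by omega) (by omega) this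

theorem prodPowInt_cast (l : List (Int × Int)) (h : ∀ pe ∈ l, 0 ≤ pe.1) :
    prodPowInt l = ((pvProdE (toNatL l) : Nat) : Int) := by
  induction l with
  | nil => simp [prodPowInt, pvProdE, toNatL]
  | cons a t ih =>
    have ha := h a (by simp)
    simp only [prodPowInt, toNatL, pvProdE, List.map_cons, List.prod_cons] at *
    rw [ih fun pe hpe => h pe (by simp [hpe])]
    push_cast [Int.toNat_of_nonneg ha]
    ring

theorem foldl_mul_eq_prod (f : Int × Int → Int) (l : List (Int × Int)) : ∀ c : Int,
    l.foldl (fun g pe => g * f pe) c = c * (l.map f).prod := by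
  induction l with
  | nil => intro c; simp
  | cons a t ih =>
    intro c
    simp only [List.foldl_cons, List.map_cons, List.prod_cons, ih (c * f a)]
    ring

theorem aFold_term (N : Int) (hN : 1 ≤ N) (p e : Int) (hp : 2 ≤ p) (he : 0 ≤ e) :
    p ^ (PySem.Int.floordiv e N).toNat = ((p.toNat ^ (e.toNat / N.toNat) : Nat) : Int) := by
  have hfd : PySem.Int.floordiv e N = ((e.toNat / N.toNat : Nat) : Int) := by
    rw [show e = ((e.toNat : Nat) : Int) by omega, show N = ((N.toNat : Nat) : Int) by omega]
    exact PySem.Int.floordiv_natCast _ _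
  rw [hfd, Int.toNat_natCast, Nat.cast_pow, Int.toNat_of_nonneg (by omega : (0:Int) ≤ p)]

theorem aFold_cast (N : Int) (hN : 1 ≤ N) (l : List (Int × Int))
    (h : ∀ pe ∈ l, 2 ≤ pe.1 ∧ 1 ≤ pe.2) :
    aFold N l = ((pvProdE ((toNatL l).map fun pe => (pe.1, pe.2 / N.toNat)) : Nat) : Int) := by
  have h1 : aFold N l = (l.map fun pe => pe.1 ^ ((PySem.Int.floordiv pe.2 N).toNat)).prod := by
    rw [aFold, foldl_mul_eq_prod]; ring
  have h2 : ((pvProdE ((toNatL l).map fun pe => (pe.1, pe.2 / N.toNat)) : Nat) : Int)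
      = (l.map fun pe => ((pe.1.toNat ^ (pe.2.toNat / N.toNat) : Nat) : Int)).prod := by
    rw [pvProdE, Nat.cast_list_prod, toNatL, List.map_map, List.map_map, List.map_map]
    rfl
  rw [h1, h2]
  refine congrArg List.prod (List.map_congr_left ?_)
  intro a ha
  exact aFold_term N hN a.1 a.2 (h a ha).1 (by have := (h a ha).2; omega)

-- ========== B's greedy loop ==========
theorem boundedPow_spec : ∀ (n : Nat) (b limit r : Int), 1 ≤ r → 2 ≤ b → r ≤ limit →
    boundedPow n b limit r = if r * b ^ n ≤ limit then some (r * b ^ n) else none := by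
  intro n
  induction n with
  | zero =>
    intro b limit r hr hb hrl
    simp only [boundedPow, pow_zero, mul_one]
    rw [if_pos hrl]
  | succ n ih =>
    intro b limit r hr hb hrl
    simp only [boundedPow]
    by_cases h : limit < r * b
    · rw [if_pos h]
      have hge : r * b ≤ r * b ^ (n + 1) := by
        have h1 : (1:Int) ≤ b ^ n := one_le_pow₀ (by omega)
        calc r * b = r * b * 1 := by ring
          _ ≤ r * b * b ^ n := by
              have : (0:Int) ≤ r * b := by positivity
              nlinarith
          _ = r * b ^ (n + 1) := by ring
      rw [if_neg (by omega)]
    · rw [if_neg h, ih b limit (r * b) (by nlinarith) hb (by omega)]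
      have : r * b * b ^ n = r * b ^ (n + 1) := by ring
      rw [this]

theorem bLoop_exit (N P m g d : Int) (hN : 2 ≤ N) (hP : 1 ≤ P)
    (hm : 1 ≤ m) (hmP : m ^ N.toNat ≤ P)
    (hg : 1 ≤ g) (hd : 2 ≤ d) (hgm : g ∣ m)
    (hinv : ∀ t : Int, 2 ≤ t → t < d → ¬ g * t ∣ m)
    (hstop : ¬ (g * d) ^ N.toNat ≤ P) : g = m := by
  obtain ⟨c, hc⟩ := hgm
  have hc1 : 1 ≤ c := by nlinarith
  by_cases hc2 : c = 1
  · rw [hc, hc2, mul_one]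
  · have hcge : 2 ≤ c := by omega
    set q := c.toNat.minFac with hq
    have hqp : q.Prime := Nat.minFac_prime (by omega)
    have hqd : (q : Int) ∣ c := by
      have : (q : Int) ∣ (c.toNat : Int) := Int.natCast_dvd_natCast.2 (Nat.minFac_dvd _)
      rwa [Int.toNat_of_nonneg (by omega)] at this
    have hq2 : 2 ≤ (q : Int) := by exact_mod_cast hqp.two_le
    have hgq : g * q ∣ m := by
      rw [hc]
      exact mul_dvd_mul_left g hqd
    have hdq : d ≤ (q : Int) := by
      by_contra hlt
      exact hinv q hq2 (by omega) hgq
    have hqc : (q : Int) ≤ c := Int.le_of_dvd (by omega) hqd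
    have hgdm : g * d ≤ m := by
      calc g * d ≤ g * q := by nlinarith
        _ ≤ g * c := by nlinarith
        _ = m := hc.symm
    exact absurd (le_trans (pow_le_pow_left₀ (by positivity) hgdm _) hmP) hstop

theorem bLoop_run (N P m : Int) (hN : 2 ≤ N) (hP : 1 ≤ P)
    (hm : 1 ≤ m) (hmP : m ^ N.toNat ≤ P)
    (hkey : ∀ g : Int, 1 ≤ g → ((g ^ N.toNat ∣ P) ↔ g ∣ m)) :
    ∀ (k : Nat) (d g : Int), (P + 2 - g * d).toNat ≤ k → 2 ≤ d → 1 ≤ g → g ∣ m →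
    (∀ t : Int, 2 ≤ t → t < d → ¬ g * t ∣ m) → bLoop k N P d g = m := by
  intro k
  induction k with
  | zero =>
    intro d g hk hd hg hgm hinv
    have hgd : P + 2 ≤ g * d := by omega
    have hbig : ¬ (g * d) ^ N.toNat ≤ P := by
      have h1 : (1:Int) ≤ g * d := by nlinarith
      have := le_self_pow₀ h1 (show N.toNat ≠ 0 by omega)
      omega
    simpa [bLoop] using bLoop_exit N P m g d hN hP hm hmP hg hd hgm hinv hbig
  | succ k ih =>
    intro d g hk hd hg hgm hinv
    have hgd2 : 2 ≤ g * d := by nlinarith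
    have hbp := boundedPow_spec N.toNat (g * d) P 1 le_rfl hgd2 hP
    rw [one_mul] at hbp
    by_cases h1 : (g * d) ^ N.toNat ≤ P
    · rw [if_pos h1] at hbp
      by_cases h2 : PySem.Int.mod P ((g * d) ^ N.toNat) = 0
      · have hdvd : (g * d) ^ N.toNat ∣ P := (PySem.Int.mod_eq_zero_iff_dvd _ _).1 h2
        have hgd1 : 1 ≤ g * d := by nlinarith
        have hgdm : g * d ∣ m := (hkey (g * d) hgd1).1 hdvd
        simp only [bLoop, hbp, if_pos h2]
        refine ih d (g * d) ?_ hd hgd1 hgdm ?_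
        · have : g * d * d ≥ g * d + 2 := by nlinarith
          omega
        · intro t ht1 ht2 htd
          exact hinv t ht1 ht2 (dvd_trans (by exact Dvd.intro_left d (by ring)) htd)
      · simp only [bLoop, hbp, if_neg h2]
        refine ih (d + 1) g ?_ (by omega) hg hgm ?_
        · have : g * (d + 1) = g * d + g := by ring
          omega
        · intro t ht1 ht2 htd
          by_cases hte : t = d
          · subst hte
            exact h2 ((PySem.Int.mod_eq_zero_iff_dvd _ _).2 ((hkey (g * t) (by nlinarith)).2 htd))
          · exact hinv t ht1 (by omega) htd
    · rw [if_neg h1] at hbp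
      simp only [bLoop, hbp]
      exact bLoop_exit N P m g d hN hP hm hmP hg hd hgm hinv h1

-- ========== assembly ==========
theorem pvAssemble (N P : Int) (hPre : P ≤ 1 ∨ 1 ≤ N) : max_gcd N P = max_gcd_alt N P := by
  by_cases hP1 : P = 1
  · subst hP1
    rw [max_gcd, if_pos rfl, max_gcd_alt, if_pos (by omega)]
  by_cases hPle : P ≤ 1
  · rw [max_gcd, if_neg hP1, max_gcd_alt, if_pos hPle]
    rw [prime_factors, pfOuter_stop _ _ _ _ (by omega : ¬ (2:Int) * 2 ≤ P)]
    simp only [pfLeftover]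
    rw [if_neg (by omega : ¬ (1:Int) < P)]
    rfl
  · have hP2 : (2:Int) ≤ P := by omega
    have hN1 : 1 ≤ N := hPre.resolve_left hPle
    obtain ⟨l, hitems, hprodl, hprops, hpair⟩ :=
      pfRun (2 * P + 2).toNat 2 P PySem.Dict.empty (by omega) (by omega) le_rfl
        (by intro d hd2 hdi; omega)
        (by intro p hp; simp [PySem.Dict.keys, PySem.Dict.empty] at hp)
    have hitems' : (prime_factors P).items = l := by
      rw [prime_factors, hitems]
      rfl
    have hprops2 : ∀ pe ∈ l, 2 ≤ pe.1 ∧ 1 ≤ pe.2 :=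
      fun pe hpe => ⟨(hprops pe hpe).1.1, (hprops pe hpe).2.1⟩
    rw [max_gcd, if_neg hP1, hitems', max_gcd_alt, if_neg (by omega : ¬ P ≤ 1)]
    by_cases hNe1 : N = 1
    · subst hNe1
      rw [if_pos rfl]
      have h1 : aFold 1 l = prodPowInt l := by
        rw [aFold, foldl_mul_eq_prod, one_mul, prodPowInt]
        refine congrArg List.prod (List.map_congr_left ?_)
        intro a _
        rw [PySem.Int.floordiv_eq_ediv_of_pos one_pos, Int.ediv_one]
      rw [h1, hprodl]
    · have hN2 : 2 ≤ N := by omega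
      rw [if_neg hNe1]
      have hLp : ∀ pe ∈ toNatL l, pe.1.Prime := by
        intro pe hpe
        obtain ⟨a, ha, rfl⟩ := List.mem_map.1 hpe
        exact intPrime_toNat a.1 (hprops a ha).1
      have hLnd : ((toNatL l).map Prod.fst).Nodup := by
        have h0 : (l.map Prod.fst).Nodup := hpair.imp ne_of_lt
        have heq : (toNatL l).map Prod.fst = (l.map Prod.fst).map Int.toNat := by
          simp [toNatL, List.map_map]
        rw [heq]
        refine List.Nodup.map_on ?_ h0
        intro x hx y hy hxy
        obtain ⟨a, ha, rfl⟩ := List.mem_map.1 hx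
        obtain ⟨b, hb, rfl⟩ := List.mem_map.1 hy
        have hxa := (hprops2 a ha).1
        have hyb := (hprops2 b hb).1
        omega
      have hPP : pvProdE (toNatL l) = P.toNat := by
        have := prodPowInt_cast l (fun pe hpe => by have := (hprops2 pe hpe).1; omega)
        rw [hprodl] at this
        omega
      have hmposN : 0 < pvProdE ((toNatL l).map fun pe => (pe.1, pe.2 / N.toNat)) := by
        refine pvProdE_pos _ ?_
        intro pe hpe
        obtain ⟨a, ha, rfl⟩ := List.mem_map.1 hpe
        exact (hLp a ha).pos
      set MN := pvProdE ((toNatL l).map fun pe => (pe.1, pe.2 / N.toNat)) with hMN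
      have hkey : ∀ g : Int, 1 ≤ g → ((g ^ N.toNat ∣ P) ↔ g ∣ (MN : Int)) := by
        intro g hg
        have hcore := pvCore (toNatL l) N.toNat g.toNat hLp hLnd (by omega) (by omega)
        rw [hPP] at hcore
        have hgc : g = ((g.toNat : Nat) : Int) := by omega
        have hPc : P = ((P.toNat : Nat) : Int) := by omega
        rw [hgc, hPc, ← Nat.cast_pow, Int.natCast_dvd_natCast, Int.natCast_dvd_natCast]
        exact hcore
      have hmP : ((MN : Nat) : Int) ^ N.toNat ≤ P := by
        have hd : ((MN : Nat) : Int) ^ N.toNat ∣ P :=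
          (hkey ((MN : Nat) : Int) (by exact_mod_cast hmposN)).2 dvd_rfl
        exact Int.le_of_dvd (by omega) hd
      have hrun := bLoop_run N P ((MN : Nat) : Int) hN2 (by omega)
        (by exact_mod_cast hmposN) hmP hkey (P + 1).toNat 2 1
        (by omega) le_rfl le_rfl (one_dvd _)
        (by intro t ht1 ht2; omega)
      rw [hrun, aFold_cast N hN1 l hprops2]

-- ===== VERDICT (by name: the statement is the Claim_ definition above) =====
theorem max_gcd_spec : Claim_equal_max_gcd := by
  intro N P _ hPre
  exact pvAssemble N P hPre
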